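-- pv_equiv track=rewrite | github.com/Isaacdl2/ClassProjects | Python/CSC_120/street.py | find_street_height
-- ===== SOURCE A (Python) =====
-- def find_street_height(areas, curr_max = None):
--     '''
--     This function finds the height of the tallest area.
--
--     Parameters: A 2D list areas.
--
--     Returns: The height of the tallest area as an integer.
--     '''
--
--     if not areas:
--         return curr_max
--     elif areas[0][0][0] == "b":
--         if curr_max is None or int(areas[0][1]) > curr_max:
--             curr_max = int(areas[0][1]) + 1
--     elif areas[0][0][0] == "p":
--         if curr_max is None or curr_max < 6:
--             curr_max = 6
--     elif areas[0][0][0] == "e":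
--         if curr_max is None or curr_max < 2:
--             curr_max = 2
--
--     return find_street_height(areas[1:], curr_max)
-- ===== SOURCE B (Python) =====
-- def _update(area):
--     """Classify one area: return (threshold, new_height) or None."""
--     c = area[0][0]
--     if c == "b":
--         t = int(area[1])
--         return (t, t + 1)
--     if c == "p":
--         return (6, 6)
--     if c == "e":
--         return (2, 2)
--     return None
--
--
-- def find_street_height(areas, curr_max=None):
--     for area in areas:
--         u = _update(area)
--         if u is not None and (curr_max is None or curr_max < u[0]):
--             curr_max = u[1]
--     return curr_max
-- ===== Notes on version B (the rewrite author's own statement) =====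
-- stated objective: alternative
-- what changed: Replaces A's tail recursion that re-slices areas[1:] at every step with a single for-loop over areas driven by a helper that classifies each area into a (threshold, new-height) pair, collapsing the three update branches into one accumulator update.
import Mathlib
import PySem

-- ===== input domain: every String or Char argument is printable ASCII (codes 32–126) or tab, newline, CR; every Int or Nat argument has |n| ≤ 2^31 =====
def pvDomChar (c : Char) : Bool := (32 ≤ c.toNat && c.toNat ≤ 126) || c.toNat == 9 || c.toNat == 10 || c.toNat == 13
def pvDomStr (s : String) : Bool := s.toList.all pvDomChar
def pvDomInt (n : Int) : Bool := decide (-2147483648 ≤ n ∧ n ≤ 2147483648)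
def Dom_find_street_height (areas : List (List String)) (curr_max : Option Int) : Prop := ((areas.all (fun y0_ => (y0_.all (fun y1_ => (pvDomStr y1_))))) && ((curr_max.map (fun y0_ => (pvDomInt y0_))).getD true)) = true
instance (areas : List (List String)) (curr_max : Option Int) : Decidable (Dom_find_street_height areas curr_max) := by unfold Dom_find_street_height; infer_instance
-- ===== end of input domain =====

-- B replaces A's quadratic tail recursion over areas[1:] with a single loop driven by a
-- per-area classification helper returning (threshold, new-height) pairs; objective: alternative decomposition.

-- ===== PORT A =====
-- Literal port of A: recursion on the list, three branches in source order; pyGetD/getD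
-- defaults are only reached where the Python raises (excluded by Pre_).
def find_street_height (areas : List (List String)) (curr_max : Option Int) : Option Int :=
  match areas with
  | [] => curr_max
  | area :: rest =>
    let c0 := PySem.Str.pyGet? (PySem.List.pyGetD area 0 "") 0
    let cm :=
      if c0 = some 'b' then
        let v := (PySem.Int.ofStr? (PySem.List.pyGetD area 1 "")).getD 0
        match curr_max with
        | none => some (v + 1)
        | some m => if v > m then some (v + 1) else some m
      else if c0 = some 'p' then
        match curr_max with
        | none => some 6
        | some m => if m < 6 then some 6 else some m
      else if c0 = some 'e' then
        match curr_max with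
        | none => some 2
        | some m => if m < 2 then some 2 else some m
      else curr_max
    find_street_height rest cm

-- ===== PORT B =====
-- Port of Source B's helper `_update`: classify one area as (threshold, new_height) or none.
def fshUpdate (area : List String) : Option (Int × Int) :=
  let c0 := PySem.Str.pyGet? (PySem.List.pyGetD area 0 "") 0
  if c0 = some 'b' then
    let t := (PySem.Int.ofStr? (PySem.List.pyGetD area 1 "")).getD 0
    some (t, t + 1)
  else if c0 = some 'p' then some (6, 6)
  else if c0 = some 'e' then some (2, 2)
  else none

def find_street_height_alt (areas : List (List String)) (curr_max : Option Int) : Option Int :=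
  areas.foldl
    (fun cm area =>
      match fshUpdate area with
      | none => cm
      | some (t, n) =>
        if (match cm with | none => true | some m => decide (m < t)) then some n else cm)
    curr_max

-- ===== PRECONDITION & SPEC =====
-- Pre_ excludes exactly the inputs where Python A raises: an empty inner list or an empty
-- first string (IndexError), and a 'b'-area lacking a second entry (IndexError) or whose
-- second entry int() rejects (ValueError).
def Pre_find_street_height (areas : List (List String)) (curr_max : Option Int) : Prop :=
  ∀ area ∈ areas, area ≠ [] ∧ (area.headD "").toList ≠ [] ∧
    ((area.headD "").toList.headD ' ' = 'b' →
      1 < area.length ∧ (PySem.Int.ofStr? (area[1]?.getD "")).isSome)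
instance (areas : List (List String)) (curr_max : Option Int) : Decidable (Pre_find_street_height areas curr_max) := by
  unfold Pre_find_street_height; infer_instance
def pvWitness_find_street_height : List (List String) × Option Int :=
  ([["building", "5"], ["park"], ["empty"]], none)
def Spec_find_street_height (areas : List (List String)) (curr_max : Option Int) (out : Option Int) : Prop := out = find_street_height_alt areas curr_max
instance (areas : List (List String)) (curr_max : Option Int) (out : Option Int) : Decidable (Spec_find_street_height areas curr_max out) := by unfold Spec_find_street_height; infer_instance

-- ===== CLAIM (what is proved, stated in full; the proofs are below) =====
def Claim_equal_find_street_height : Prop := ∀ (areas : List (List String)) (curr_max : Option Int), Dom_find_street_height areas curr_max → Pre_find_street_height areas curr_max → Spec_find_street_height areas curr_max (find_street_height areas curr_max)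

-- ===== LEMMAS AND PROOFS =====
theorem fsh_agree (areas : List (List String)) (curr_max : Option Int) :
    find_street_height areas curr_max = find_street_height_alt areas curr_max := by
  induction areas generalizing curr_max with
  | nil => rfl
  | cons area rest ih =>
    rw [find_street_height.eq_def, find_street_height_alt, List.foldl_cons,
      ← find_street_height_alt, ← ih]
    simp only []
    congr 1
    simp only [fshUpdate]
    by_cases hb : PySem.Str.pyGet? (PySem.List.pyGetD area 0 "") 0 = some 'b' <;>
      by_cases hp : PySem.Str.pyGet? (PySem.List.pyGetD area 0 "") 0 = some 'p' <;>
      by_cases he : PySem.Str.pyGet? (PySem.List.pyGetD area 0 "") 0 = some 'e' <;>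
      simp only [hb, hp, he, if_pos, if_neg, not_false_iff] <;>
      cases curr_max <;> simp

-- ===== VERDICT (by name: the statement is the Claim_ definition above) =====
theorem find_street_height_spec : Claim_equal_find_street_height := by
  intro areas curr_max _ _
  exact fsh_agree areas curr_max
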